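-- pv_equiv track=rewrite | github.com/Shulu-Chen/Multi-agentRL_RM | PaxBehavior.py | Settlement
-- ===== SOURCE A (Python) =====
-- def Settlement(price, total_pax,class_level,day):
--     r=0
--     b=0
--     for i in range(total_pax):
--         # buy=PaxProb(price,class_level,day)
--         buy=True
--         if buy:
--             r+=price
--             b+=1
--     return [r,b]
-- ===== SOURCE B (Python) =====
-- def Settlement(price, total_pax, class_level, day):
--     # every iteration unconditionally adds price and counts one, so closed form
--     n = total_pax if total_pax > 0 else 0
--     return [price * n, n]
-- ===== Notes on version B (the rewrite author's own statement) =====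
-- stated objective: faster
-- what changed: Replaces the per-passenger loop (which adds price and increments a counter unconditionally each iteration) with the closed form [price*n, n] where n = max(total_pax, 0).
import Mathlib
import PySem

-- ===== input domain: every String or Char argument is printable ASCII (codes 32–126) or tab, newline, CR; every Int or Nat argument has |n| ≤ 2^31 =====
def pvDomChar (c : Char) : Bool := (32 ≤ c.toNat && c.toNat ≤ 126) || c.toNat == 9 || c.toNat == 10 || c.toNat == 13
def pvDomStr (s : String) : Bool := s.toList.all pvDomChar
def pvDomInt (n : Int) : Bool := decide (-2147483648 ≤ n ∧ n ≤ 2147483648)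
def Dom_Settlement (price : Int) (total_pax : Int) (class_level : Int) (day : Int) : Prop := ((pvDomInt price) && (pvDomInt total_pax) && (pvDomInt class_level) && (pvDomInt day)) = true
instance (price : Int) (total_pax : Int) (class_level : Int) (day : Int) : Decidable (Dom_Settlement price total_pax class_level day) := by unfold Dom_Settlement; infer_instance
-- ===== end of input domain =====

-- ===== PORT A =====
-- B replaces the loop with the closed form [price*n, n], n = max(total_pax, 0) (asymptotically faster).
def Settlement (price : Int) (total_pax : Int) (class_level : Int) (day : Int) : List Int :=
  let rb := (PySem.List.pyRange 0 total_pax 1).foldl (fun s _ => (s.1 + price, s.2 + 1)) ((0 : Int), (0 : Int))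
  [rb.1, rb.2]

-- ===== PORT B =====
def Settlement_alt (price : Int) (total_pax : Int) (class_level : Int) (day : Int) : List Int :=
  let n : Int := if total_pax > 0 then total_pax else 0
  [price * n, n]

-- ===== PRECONDITION & SPEC =====
def Spec_Settlement (price : Int) (total_pax : Int) (class_level : Int) (day : Int) (out : List Int) : Prop := out = Settlement_alt price total_pax class_level day
instance (price : Int) (total_pax : Int) (class_level : Int) (day : Int) (out : List Int) : Decidable (Spec_Settlement price total_pax class_level day out) := by unfold Spec_Settlement; infer_instance

-- ===== CLAIM (what is proved, stated in full; the proofs are below) =====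
def Claim_equal_Settlement : Prop := ∀ (price : Int) (total_pax : Int) (class_level : Int) (day : Int), Dom_Settlement price total_pax class_level day → Spec_Settlement price total_pax class_level day (Settlement price total_pax class_level day)

-- ===== LEMMAS AND PROOFS =====

-- ===== VERDICT (by name: the statement is the Claim_ definition above) =====
lemma settle_foldl (price : Int) (l : List Int) (r b : Int) :
    l.foldl (fun s (_ : Int) => (s.1 + price, s.2 + 1)) (r, b)
      = (r + price * l.length, b + l.length) := by
  induction l generalizing r b with
  | nil => simp
  | cons x xs ih => simp [List.foldl, ih]; constructor <;> push_cast <;> ring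

theorem Settlement_spec : Claim_equal_Settlement := by
  intro price total_pax class_level day _
  unfold Spec_Settlement Settlement Settlement_alt
  rw [settle_foldl, PySem.List.length_pyRange_one]
  have hm : (((total_pax - 0).toNat : ℕ) : Int) = if total_pax > 0 then total_pax else 0 := by
    split_ifs <;> omega
  rw [hm]
  simp
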